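-- pv_equiv track=rewrite | github.com/pleiadian53/meta-spliceai | meta_spliceai/mllib/sampling.py | divide_interval
-- ===== SOURCE A (Python) =====
-- def divide_interval(total, n_parts):
--     pl = [0] * n_parts
--     for i in range(n_parts):
--         pl[i] = total // n_parts    # integer division
--
--     # divide up the remainder
--     r = total % n_parts
--     for j in range(r):
--         pl[j] += 1
--
--     return pl
-- ===== SOURCE B (Python) =====
-- def divide_interval(total, n_parts):
--     # Greedy ceiling division on the running remainder: give each slot the
--     # ceiling of (what is left) / (slots left).  No modulo, no second pass.
--     parts = []
--     remaining = total
--     for k in range(n_parts, 0, -1):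
--         part = -(-remaining // k)
--         parts.append(part)
--         remaining -= part
--     return parts
-- ===== Notes on version B (the rewrite author's own statement) =====
-- stated objective: alternative
-- what changed: Replaces A's fill/base pass plus a second remainder-increment pass with a single greedy loop that assigns each slot the ceiling of the running remainder divided by the slots left (no modulo, no list mutation).
import Mathlib
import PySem

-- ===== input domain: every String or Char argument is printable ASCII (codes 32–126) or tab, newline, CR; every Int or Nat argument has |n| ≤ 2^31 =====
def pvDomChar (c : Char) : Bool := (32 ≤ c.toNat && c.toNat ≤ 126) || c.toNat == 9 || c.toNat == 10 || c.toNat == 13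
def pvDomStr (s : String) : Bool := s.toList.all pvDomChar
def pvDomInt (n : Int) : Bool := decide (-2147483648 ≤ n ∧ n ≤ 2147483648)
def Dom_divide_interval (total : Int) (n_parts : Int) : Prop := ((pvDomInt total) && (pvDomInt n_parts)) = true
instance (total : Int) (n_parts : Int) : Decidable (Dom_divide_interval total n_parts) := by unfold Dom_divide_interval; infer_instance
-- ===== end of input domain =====

-- B replaces A's fill-then-distribute-remainder two-pass scheme with a greedy one-pass loop that gives
-- each slot the ceiling of (running remainder)/(slots left) — no modulo, no second pass (objective: alternative).


-- ===== PORT A =====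
def divide_interval (total : Int) (n_parts : Int) : List Int :=
  let pl := List.replicate n_parts.toNat 0
  let pl := (PySem.List.pyRange 0 n_parts 1).foldl
    (fun pl i => pl.set i.toNat (PySem.Int.floordiv total n_parts)) pl
  let r := PySem.Int.mod total n_parts
  (PySem.List.pyRange 0 r 1).foldl
    (fun pl j => pl.set j.toNat (pl.getD j.toNat 0 + 1)) pl

-- ===== PORT B =====
-- loop 'for k in range(n_parts, 0, -1)' carrying (parts, remaining); part = -(-remaining // k)
def divide_interval_alt (total : Int) (n_parts : Int) : List Int :=
  ((PySem.List.pyRange n_parts 0 (-1)).foldl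
    (fun (st : List Int × Int) k =>
      let part := -(PySem.Int.floordiv (-st.2) k)
      (st.1 ++ [part], st.2 - part))
    ([], total)).1

-- ===== PRECONDITION & SPEC =====
-- Pre_ excludes only n_parts = 0, where Python A raises ZeroDivisionError.
def Pre_divide_interval (total : Int) (n_parts : Int) : Prop := n_parts ≠ 0
instance (total : Int) (n_parts : Int) : Decidable (Pre_divide_interval total n_parts) := by unfold Pre_divide_interval; infer_instance
def pvWitness_divide_interval : Int × Int := (10, 3)
def Spec_divide_interval (total : Int) (n_parts : Int) (out : List Int) : Prop := out = divide_interval_alt total n_parts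
instance (total : Int) (n_parts : Int) (out : List Int) : Decidable (Spec_divide_interval total n_parts out) := by unfold Spec_divide_interval; infer_instance

-- ===== CLAIM (what is proved, stated in full; the proofs are below) =====
def Claim_equal_divide_interval : Prop := ∀ (total : Int) (n_parts : Int), Dom_divide_interval total n_parts → Pre_divide_interval total n_parts → Spec_divide_interval total n_parts (divide_interval total n_parts)

-- ===== LEMMAS AND PROOFS =====

-- the common closed form both ports are reduced to
def pvShape (q r : Int) (n : Nat) : List Int :=
  (List.range n).map (fun i : Nat => q + if (i : Int) < r then 1 else 0)

-- ---- A-side lemmas ----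

theorem pv_length_foldl_set (g : Nat → Int → Int) (r : Nat) (l : List Int) :
    ((List.range r).foldl (fun pl i => pl.set i (g i (pl.getD i 0))) l).length = l.length := by
  induction r with
  | zero => simp
  | succ r ih =>
      rw [List.range_succ, List.foldl_append, List.foldl_cons, List.foldl_nil, List.length_set]
      exact ih

theorem pv_foldl_set_get? (g : Nat → Int → Int) (r : Nat) (l : List Int) (k : Nat) :
    ((List.range r).foldl (fun pl i => pl.set i (g i (pl.getD i 0))) l)[k]?
      = if k < r ∧ k < l.length then some (g k (l.getD k 0)) else l[k]? := by
  induction r generalizing k with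
  | zero => simp
  | succ r ih =>
      rw [List.range_succ, List.foldl_append, List.foldl_cons, List.foldl_nil]
      have hlen := pv_length_foldl_set g r l
      rw [List.getElem?_set]
      have hXr : (List.foldl (fun pl i => pl.set i (g i (pl.getD i 0))) l (List.range r)).getD r 0
          = l.getD r 0 := by
        rw [List.getD_eq_getElem?_getD, ih r, if_neg (by omega), List.getD_eq_getElem?_getD]
      by_cases hk : r = k
      · subst hk
        rw [if_pos rfl, hlen]
        by_cases hl : r < l.length
        · rw [if_pos hl, if_pos ⟨by omega, hl⟩, hXr]
        · rw [if_neg hl, if_neg (by omega), List.getElem?_eq_none (by omega)]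
      · rw [if_neg hk, ih k]
        have heq : (k < r ∧ k < l.length) ↔ (k < r + 1 ∧ k < l.length) := by omega
        rw [if_congr heq rfl rfl]

-- A computes: first r entries base+1, rest base (as a map over range(n_parts))
theorem pv_A_map (total n_parts : Int) (hpre : n_parts ≠ 0) :
    divide_interval total n_parts
      = (PySem.List.pyRange 0 n_parts 1).map
          (fun i => if i < PySem.Int.mod total n_parts then PySem.Int.floordiv total n_parts + 1
                    else PySem.Int.floordiv total n_parts) := by
  show (PySem.List.pyRange 0 (PySem.Int.mod total n_parts) 1).foldl
      (fun pl j => pl.set j.toNat (pl.getD j.toNat 0 + 1))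
      ((PySem.List.pyRange 0 n_parts 1).foldl
        (fun pl i => pl.set i.toNat (PySem.Int.floordiv total n_parts))
        (List.replicate n_parts.toNat 0))
    = (PySem.List.pyRange 0 n_parts 1).map
        (fun i => if i < PySem.Int.mod total n_parts then PySem.Int.floordiv total n_parts + 1
                  else PySem.Int.floordiv total n_parts)
  rcases lt_or_gt_of_ne hpre with hneg | hpos
  · have hr0 : PySem.Int.mod total n_parts ≤ 0 := (PySem.Int.mod_neg_bounds total hneg).2
    rw [show PySem.List.pyRange 0 n_parts 1 = [] from by
        rw [PySem.List.pyRange_one]; simp; omega,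
      show PySem.List.pyRange 0 (PySem.Int.mod total n_parts) 1 = [] from by
        rw [PySem.List.pyRange_one]; simp; omega]
    simp [show n_parts.toNat = 0 by omega]
  · have hrnn : 0 ≤ PySem.Int.mod total n_parts := PySem.Int.mod_nonneg total hpos
    have hrlt : PySem.Int.mod total n_parts < n_parts := PySem.Int.mod_lt total hpos
    rw [PySem.List.pyRange_one 0 n_parts, PySem.List.pyRange_one 0 (PySem.Int.mod total n_parts)]
    simp only [Int.sub_zero, zero_add, List.foldl_map, List.map_map, Function.comp_def,
      Int.toNat_natCast]
    generalize hB : PySem.Int.floordiv total n_parts = base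
    generalize hR : PySem.Int.mod total n_parts = r at hrnn hrlt ⊢
    set n := n_parts.toNat with hn
    have hnr : r.toNat ≤ n := by omega
    have H1 := fun k => pv_foldl_set_get? (fun _ _ => base) n (List.replicate n 0) k
    simp only [] at H1
    set X1 := (List.range n).foldl (fun pl i => pl.set i base) (List.replicate n 0) with hX1
    have hX1len : X1.length = n := by
      have := pv_length_foldl_set (fun _ _ => base) n (List.replicate n 0)
      simp only [] at this
      rw [hX1, this, List.length_replicate]
    have hX1get : ∀ k : Nat, X1[k]? = if k < n then some base else none := by
      intro k
      rw [hX1, H1 k]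
      by_cases hk : k < n
      · rw [if_pos ⟨hk, by simp [hk]⟩, if_pos hk]
      · rw [if_neg (by simp; omega), if_neg hk, List.getElem?_eq_none (by simp; omega)]
    have H2 := fun k => pv_foldl_set_get? (fun _ v => v + 1) r.toNat X1 k
    simp only [] at H2
    apply List.ext_getElem?
    intro k
    rw [H2 k, hX1len]
    by_cases hk : k < n
    · have hRHS : ((List.range n).map (fun (a : Nat) => if (a : Int) < r then base + 1 else base))[k]?
          = some (if (k : Int) < r then base + 1 else base) := by
        rw [List.getElem?_map, List.getElem?_range hk]
        rfl
      rw [hRHS]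
      by_cases hkr : k < r.toNat
      · have hX1getD : X1.getD k 0 = base := by
          rw [List.getD_eq_getElem?_getD, hX1get k, if_pos hk]
          rfl
        rw [if_pos ⟨hkr, hk⟩, hX1getD, if_pos (by omega)]
      · rw [if_neg (by omega), hX1get k, if_pos hk, if_neg (by omega)]
    · rw [if_neg (by omega), hX1get k, if_neg hk, List.getElem?_eq_none (by simp; omega)]

-- the map form is the closed form pvShape
theorem pv_shape_conv (base r n : Int) :
    (PySem.List.pyRange 0 n 1).map (fun i => if i < r then base + 1 else base)
      = pvShape base r n.toNat := by
  rw [PySem.List.pyRange_one]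
  unfold pvShape
  rw [List.map_map]
  simp only [Int.sub_zero]
  apply List.map_congr_left
  intro k _
  simp only [Function.comp_def, zero_add]
  split_ifs <;> ring

-- ---- B-side lemmas ----

theorem pvShape_zero (q r : Int) : pvShape q r 0 = [] := by
  simp [pvShape]

theorem pvShape_succ (q r : Int) (n : Nat) :
    pvShape q r (n + 1) = (q + if (0 : Int) < r then 1 else 0) :: pvShape q (r - 1) n := by
  unfold pvShape
  rw [List.range_succ_eq_map, List.map_cons, List.map_map]
  rw [List.cons.injEq]
  refine ⟨by norm_num, ?_⟩
  apply List.map_congr_left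
  intro i _
  simp only [Function.comp_def]
  have hc : ((i.succ : Nat) : Int) = (i : Int) + 1 := by push_cast; ring
  rw [hc, if_congr (show ((i : Int) + 1 < r ↔ (i : Int) < r - 1) from by omega) rfl rfl]

theorem pvShape_nonpos (q r r' : Int) (n : Nat) (h : r ≤ 0) (h' : r' ≤ 0) :
    pvShape q r n = pvShape q r' n := by
  unfold pvShape
  apply List.map_congr_left
  intro i _
  rw [if_neg (by omega), if_neg (by omega)]

-- B's countdown loop over [n, n-1, ..., 1] produces the same closed form
theorem pv_B_loop (n : Nat) : ∀ (acc : List Int) (rem : Int),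
    ((PySem.List.pyRange (n : Int) 0 (-1)).foldl
      (fun (st : List Int × Int) k =>
        let part := -(PySem.Int.floordiv (-st.2) k)
        (st.1 ++ [part], st.2 - part))
      (acc, rem)).1
    = acc ++ pvShape (PySem.Int.floordiv rem n) (PySem.Int.mod rem n) n := by
  induction n with
  | zero =>
      intro acc rem
      rw [PySem.List.pyRange_neg_one_eq_nil (by omega)]
      simp [pvShape]
  | succ n ih =>
      intro acc rem
      push_cast
      have hd : (0 : Int) < ((n : Int) + 1) := by omega
      generalize hq : PySem.Int.floordiv rem ((n : Int) + 1) = q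
      generalize hr : PySem.Int.mod rem ((n : Int) + 1) = r
      have hid : q * ((n : Int) + 1) + r = rem := by
        rw [← hq, ← hr]; exact PySem.Int.floordiv_mul_add_mod rem _
      have hrnn : 0 ≤ r := by rw [← hr]; exact PySem.Int.mod_nonneg rem hd
      have hrlt : r < (n : Int) + 1 := by rw [← hr]; exact PySem.Int.mod_lt rem hd
      rw [PySem.List.pyRange_neg_one_cons (by omega), List.foldl_cons]
      simp only []
      rw [show ((n : Int) + 1 - 1) = (n : Int) from by ring]
      by_cases h0 : (0 : Int) < r
      · -- remainder still positive: this slot gets q + 1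
        have hpart : -(PySem.Int.floordiv (-rem) ((n : Int) + 1)) = q + 1 := by
          rw [PySem.Int.neg_floordiv_neg_eq_iff_of_pos hd]
          constructor
          · ring_nf; ring_nf at hid; linarith
          · ring_nf; ring_nf at hid hrlt; linarith
        rw [hpart, ih, pvShape_succ, if_pos h0]
        cases n with
        | zero =>
            rw [pvShape_zero, pvShape_zero]
            simp
        | succ m =>
            have hm : (0 : Int) < ((m : Int) + 1) := by positivity
            have hmc : (((m : Nat) + 1 : Nat) : Int) = (m : Int) + 1 := by push_cast; ring
            have hid' : rem - (q + 1) = q * ((m : Int) + 1) + (r - 1) := by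
              push_cast at hid
              linear_combination -hid
            have hrlt' : r < (m : Int) + 1 + 1 := by push_cast at hrlt; linarith
            have hq' : PySem.Int.floordiv (rem - (q + 1)) ((m : Int) + 1) = q := by
              rw [PySem.Int.floordiv_eq_iff_of_pos hm]
              constructor
              · rw [hid']; nlinarith [h0]
              · rw [hid']; nlinarith [hrlt']
            have hr' : PySem.Int.mod (rem - (q + 1)) ((m : Int) + 1) = r - 1 := by
              have hmm := PySem.Int.floordiv_mul_add_mod (rem - (q + 1)) ((m : Int) + 1)
              rw [hq'] at hmm
              linarith [hid']
            rw [hmc, hq', hr']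
            simp
      · -- remainder exhausted: this slot gets exactly q
        have hr0 : r = 0 := by omega
        have hpart : -(PySem.Int.floordiv (-rem) ((n : Int) + 1)) = q := by
          rw [PySem.Int.neg_floordiv_neg_eq_iff_of_pos hd]
          constructor
          · ring_nf; ring_nf at hid; linarith
          · ring_nf; ring_nf at hid; linarith
        rw [hpart, ih, pvShape_succ, if_neg h0]
        cases n with
        | zero =>
            rw [pvShape_zero, pvShape_zero]
            simp
        | succ m =>
            have hm : (0 : Int) < ((m : Int) + 1) := by positivity
            have hmc : (((m : Nat) + 1 : Nat) : Int) = (m : Int) + 1 := by push_cast; ring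
            have hid' : rem - q = q * ((m : Int) + 1) := by
              push_cast at hid
              linear_combination -hid + hr0
            have hq' : PySem.Int.floordiv (rem - q) ((m : Int) + 1) = q := by
              rw [PySem.Int.floordiv_eq_iff_of_pos hm]
              constructor
              · rw [hid']
              · rw [hid']; nlinarith [hm]
            have hr' : PySem.Int.mod (rem - q) ((m : Int) + 1) = 0 := by
              have hmm := PySem.Int.floordiv_mul_add_mod (rem - q) ((m : Int) + 1)
              rw [hq'] at hmm
              linarith [hid']
            rw [hmc, hq', hr']
            rw [pvShape_nonpos q 0 (r - 1) (m + 1) (by omega) (by omega)]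
            simp

theorem pv_B_char (total n_parts : Int) :
    divide_interval_alt total n_parts
      = if n_parts ≤ 0 then []
        else pvShape (PySem.Int.floordiv total n_parts) (PySem.Int.mod total n_parts)
               n_parts.toNat := by
  unfold divide_interval_alt
  by_cases h : n_parts ≤ 0
  · rw [if_pos h, PySem.List.pyRange_neg_one_eq_nil h]
    simp
  · rw [if_neg h]
    have hcast : n_parts = ((n_parts.toNat : Nat) : Int) := by omega
    conv_lhs => rw [hcast]
    rw [pv_B_loop n_parts.toNat [] total, List.nil_append, ← hcast]

-- ===== VERDICT =====
theorem divide_interval_spec : Claim_equal_divide_interval := by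
  intro total n_parts _ hpre
  unfold Spec_divide_interval
  rw [pv_A_map total n_parts hpre, pv_shape_conv, pv_B_char total n_parts]
  rcases lt_or_gt_of_ne hpre with hneg | hpos
  · rw [if_pos (by omega)]
    simp [pvShape, show n_parts.toNat = 0 by omega]
  · rw [if_neg (by omega)]
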